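-- pv_equiv track=rewrite | github.com/dcoder201/Maximum-Occuring-Character | solution.py | getMaxOccurringChar
-- ===== SOURCE A (Python) =====
-- def getMaxOccurringChar(s):
--     #code here
--     res=[]
--     d=dict()
--     for i in s:
--         if i not in d:
--             d[i]=1
--         else:
--             d[i]+=1
--     for val in d.keys():
--         if d[val]==max(list(d.values())):
--             res.append(val)
--     return(sorted(res)[0])
-- ===== SOURCE B (Python) =====
-- def getMaxOccurringChar(s):
--     # peel off the smallest character (and all its occurrences), recurse on the rest,
--     # and keep the peeled character whenever its count is at least the champion's
--     def go(cs):
--         m = min(cs)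
--         rest = [c for c in cs if c != m]
--         k = len(cs) - len(rest)
--         if not rest:
--             return (m, k)
--         b, bk = go(rest)
--         return (m, k) if k >= bk else (b, bk)
--     return go(list(s))[0]
-- ===== Notes on version B (the rewrite author's own statement) =====
-- stated objective: alternative
-- what changed: Replaces A's frequency-dict accumulation, collect-all-tied-keys pass and final sort by a selection recursion: repeatedly peel the smallest character (and all its occurrences, counted by length difference) off the string and keep the peeled character in a >=-tournament, so no dictionary, no tie list and no sort exist.
import Mathlib
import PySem

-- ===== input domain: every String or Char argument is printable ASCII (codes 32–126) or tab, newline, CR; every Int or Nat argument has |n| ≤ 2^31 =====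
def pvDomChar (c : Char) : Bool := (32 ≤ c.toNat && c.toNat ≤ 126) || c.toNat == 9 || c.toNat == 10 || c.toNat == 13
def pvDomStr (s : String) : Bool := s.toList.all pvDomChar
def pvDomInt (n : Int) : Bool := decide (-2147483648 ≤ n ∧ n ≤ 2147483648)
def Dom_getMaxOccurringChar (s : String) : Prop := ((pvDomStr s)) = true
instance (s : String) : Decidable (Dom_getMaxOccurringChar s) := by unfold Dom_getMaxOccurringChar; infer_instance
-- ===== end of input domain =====

-- B replaces A's frequency-dict + collect-ties + sort pipeline by a selection recursion that
-- peels the smallest character off the string and runs a single ≥-tournament; objective: alternative.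

-- ===== PORT A =====
-- dict build: 'if i not in d: d[i]=1 else: d[i]+=1'; then keys with count equal to the max of
-- the values; sorted(res)[0] raises IndexError on the empty string, excluded by Pre_
-- (the [] branch is unreachable there).
def getMaxOccurringChar (s : String) : String :=
  let d : PySem.Dict Char Int := s.toList.foldl
    (fun d i => if !d.contains i then d.insert i 1 else d.insert i (d.getD i 0 + 1))
    PySem.Dict.empty
  let res : List Char := d.keys.foldl
    (fun res val => if some (d.getD val 0) == PySem.List.max? d.values (fun x => x)
                    then res ++ [val] else res) []
  match PySem.List.sorted res (fun x => x) false with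
  | c :: _ => String.ofList [c]
  | [] => ""

-- ===== PORT B =====
-- 'go': min(cs) is PySem.List.min? (none = ValueError on [], unreachable there under Pre_);
-- the comprehension '[c for c in cs if c != m]' is pvRemoveNe; k = len(cs) - len(rest).
def pvRemoveNe (cs : List Char) (m : Char) : List Char := cs.filter (fun c => c != m)

-- cited by goAlt's decreasing_by (the peeled minimum really disappears)
theorem pvRemoveNe_lt {cs : List Char} {m : Char} (h : m ∈ cs) :
    (pvRemoveNe cs m).length < cs.length :=
  List.length_filter_lt_length_iff_exists.mpr ⟨m, h, by simp⟩

def goAlt (cs : List Char) : Char × Int :=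
  match hm : PySem.List.min? cs (fun c => c) with
  | none => (' ', 0)   -- Python's min([]) raises; Pre_ keeps inputs away from this branch
  | some m =>
    let rest := pvRemoveNe cs m
    let k : Int := (cs.length : Int) - (rest.length : Int)
    if rest = [] then (m, k)
    else
      let p := goAlt rest
      if k ≥ p.2 then (m, k) else p
termination_by cs.length
decreasing_by exact pvRemoveNe_lt (PySem.List.min?_mem hm)

def getMaxOccurringChar_alt (s : String) : String :=
  if s.toList = [] then "" else String.ofList [(goAlt s.toList).1]

-- ===== PRECONDITION & SPEC =====
-- Pre_ excludes only the empty string, on which Python A raises IndexError (sorted([])[0]).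
def Pre_getMaxOccurringChar (s : String) : Prop := s.toList ≠ []
instance (s : String) : Decidable (Pre_getMaxOccurringChar s) := by unfold Pre_getMaxOccurringChar; infer_instance
def pvWitness_getMaxOccurringChar : String := "abba c"
def Spec_getMaxOccurringChar (s : String) (out : String) : Prop := out = getMaxOccurringChar_alt s
instance (s : String) (out : String) : Decidable (Spec_getMaxOccurringChar s out) := by unfold Spec_getMaxOccurringChar; infer_instance

-- ===== CLAIM (what is proved, stated in full; the proofs are below) =====
def Claim_equal_getMaxOccurringChar : Prop := ∀ (s : String), Dom_getMaxOccurringChar s → Pre_getMaxOccurringChar s → Spec_getMaxOccurringChar s (getMaxOccurringChar s)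

-- ===== LEMMAS AND PROOFS =====

-- 'best cs c': c occurs in cs, no character occurs more often, and c is the least such character.
-- Both ports' answers satisfy this, and it is unique.
def pvBest (cs : List Char) (c : Char) : Prop :=
  c ∈ cs ∧ (∀ d ∈ cs, cs.count d ≤ cs.count c) ∧ (∀ d ∈ cs, cs.count d = cs.count c → c ≤ d)

theorem pvBest_unique {cs : List Char} {c c' : Char}
    (h : pvBest cs c) (h' : pvBest cs c') : c = c' := by
  obtain ⟨hm, hle, htie⟩ := h
  obtain ⟨hm', hle', htie'⟩ := h'
  have e : cs.count c' = cs.count c := le_antisymm (hle c' hm') (hle' c hm)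
  exact le_antisymm (htie c' hm' e) (htie' c hm (e.symm))

-- ---- B side ----
theorem goAlt_best : ∀ (n : ℕ) (cs : List Char), cs.length ≤ n → cs ≠ [] →
    pvBest cs (goAlt cs).1 ∧ (goAlt cs).2 = (cs.count (goAlt cs).1 : Int) := by
  intro n
  induction n with
  | zero => intro cs hl hne; cases cs <;> simp_all
  | succ n ih =>
    intro cs hl hne
    rw [goAlt]
    cases hm : PySem.List.min? cs (fun c => c) with
    | none => exact absurd ((PySem.List.min?_eq_none_iff _ _).mp hm) hne
    | some m =>
      simp only
      have hmem : m ∈ cs := PySem.List.min?_mem hm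
      have hmin : ∀ d ∈ cs, m ≤ d := fun d hd => PySem.List.min?_isMin hm d hd
      have hmemr : ∀ d, d ∈ pvRemoveNe cs m ↔ d ∈ cs ∧ d ≠ m := by
        intro d; simp [pvRemoveNe, List.mem_filter]
      have hcount_ne : ∀ d, d ≠ m → (pvRemoveNe cs m).count d = cs.count d := by
        intro d hd
        exact List.count_filter (by simp [hd])
      have hk : ((cs.length : Int) - ((pvRemoveNe cs m).length : Int)) = (cs.count m : Int) := by
        have hsplit := List.length_eq_length_filter_add (l := cs) (fun c => c == m)
        have hcf : cs.count m = (cs.filter (fun c => c == m)).length := by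
          simp [List.count, List.countP_eq_length_filter]
        have hneg : cs.filter (fun c => !(c == m)) = pvRemoveNe cs m := by
          simp [pvRemoveNe, bne]
        rw [hneg] at hsplit
        omega
      by_cases hre : pvRemoveNe cs m = []
      · have hall : ∀ d ∈ cs, d = m := by
          intro d hd
          by_contra hdm
          exact (List.ne_nil_of_mem ((hmemr d).mpr ⟨hd, hdm⟩)) hre
        rw [if_pos hre]
        refine ⟨⟨hmem, ?_, ?_⟩, hk⟩
        · intro d hd; rw [hall d hd]
        · intro d hd _; exact hmin d hd
      · rw [if_neg hre]
        have hrl : (pvRemoveNe cs m).length < cs.length := pvRemoveNe_lt hmem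
        obtain ⟨⟨hbm, hble, hbtie⟩, hbk⟩ := ih (pvRemoveNe cs m) (by omega) hre
        have hbcs : (goAlt (pvRemoveNe cs m)).1 ∈ cs := ((hmemr _).mp hbm).1
        have hbnm : (goAlt (pvRemoveNe cs m)).1 ≠ m := ((hmemr _).mp hbm).2
        have hbc : (pvRemoveNe cs m).count (goAlt (pvRemoveNe cs m)).1
            = cs.count (goAlt (pvRemoveNe cs m)).1 := hcount_ne _ hbnm
        by_cases hge : ((cs.length : Int) - ((pvRemoveNe cs m).length : Int)) ≥ (goAlt (pvRemoveNe cs m)).2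
        · rw [if_pos hge]
          have hdom : ∀ d ∈ cs, cs.count d ≤ cs.count m := by
            intro d hd
            by_cases hdm : d = m
            · rw [hdm]
            · have hdr : d ∈ pvRemoveNe cs m := (hmemr d).mpr ⟨hd, hdm⟩
              have h1 := hble d hdr
              have h2 := hcount_ne d hdm
              rw [hbk, hbc] at hge
              omega
          exact ⟨⟨hmem, hdom, fun d hd _ => hmin d hd⟩, hk⟩
        · rw [if_neg hge]
          rw [hbk, hbc] at hge
          have hlt : (cs.count m : Int) < (cs.count (goAlt (pvRemoveNe cs m)).1 : Int) := by omega
          refine ⟨⟨hbcs, ?_, ?_⟩, by rw [hbk, hbc]⟩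
          · intro d hd
            by_cases hdm : d = m
            · subst hdm; omega
            · have hdr : d ∈ pvRemoveNe cs m := (hmemr d).mpr ⟨hd, hdm⟩
              have := hble d hdr
              have := hcount_ne d hdm
              omega
          · intro d hd he
            by_cases hdm : d = m
            · subst hdm; omega
            · have hdr : d ∈ pvRemoveNe cs m := (hmemr d).mpr ⟨hd, hdm⟩
              exact hbtie d hdr (by rw [hcount_ne d hdm, hbc, he])

-- ---- A side ----
-- A's conditional dict loop is Counter: on a fresh key the two branches insert the same value 1.
theorem fold_eq_counter (cs : List Char) :
    cs.foldl (fun d i => if !d.contains i then d.insert i 1 else d.insert i (d.getD i 0 + 1))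
      PySem.Dict.empty = PySem.Dict.counter cs := by
  rw [← PySem.Dict.foldl_insert_getD_add_one_eq_counter]
  apply PySem.List.foldl_congr_mem
  intro d i _
  by_cases h : d.contains i = true
  · simp [h]
  · simp [h, PySem.Dict.getD_of_not_contains (d := d) (k := i) (d0 := 0) (by simpa using h)]

theorem values_counter (cs : List Char) :
    (PySem.Dict.counter cs).values = (PySem.Set.ofList cs).map (fun k => (cs.count k : Int)) := by
  have h := PySem.Dict.values_eq_map_keys (PySem.Dict.counter cs) (PySem.Dict.nodup_keys_counter cs) 0
  rw [h, PySem.Dict.keys_counter]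
  exact List.map_congr_left (fun k _ => PySem.Dict.getD_counter cs k)

theorem A_best (s : String) (hpre : s.toList ≠ []) :
    ∃ c, pvBest s.toList c ∧ getMaxOccurringChar s = String.ofList [c] := by
  have hcs : s.toList ≠ [] := hpre
  unfold getMaxOccurringChar
  generalize s.toList = cs at hcs ⊢
  simp only [fold_eq_counter, PySem.List.foldl_append_if_eq_filter, List.nil_append,
             PySem.Dict.keys_counter]
  -- the max of the counter's values
  obtain ⟨mx, hmx⟩ : ∃ mx, PySem.List.max? (PySem.Dict.counter cs).values (fun x => x) = some mx := by
    cases h : PySem.List.max? (PySem.Dict.counter cs).values (fun x => x) with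
    | none =>
      have : (PySem.Dict.counter cs).values = [] := (PySem.List.max?_eq_none_iff _ _).mp h
      rw [values_counter] at this
      obtain ⟨x, xs, hxx⟩ := List.exists_cons_of_ne_nil hcs
      rw [hxx] at this
      simp [PySem.Set.ofList_cons] at this
    | some mx => exact ⟨mx, rfl⟩
  have hmx_mem : ∃ c ∈ cs, (cs.count c : Int) = mx := by
    have := PySem.List.max?_mem hmx
    rw [values_counter] at this
    obtain ⟨c, hc, he⟩ := List.mem_map.mp this
    exact ⟨c, (PySem.Set.mem_ofList _ _).mp hc, he⟩
  have hmx_ub : ∀ c ∈ cs, (cs.count c : Int) ≤ mx := by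
    intro c hc
    have := PySem.List.max?_isMax hmx ((cs.count c : Int))
      (by rw [values_counter]
          exact List.mem_map.mpr ⟨c, (PySem.Set.mem_ofList _ _).mpr hc, rfl⟩)
    simpa using this
  rw [hmx]
  set res := (PySem.Set.ofList cs).filter
      (fun val => some ((PySem.Dict.counter cs).getD val 0) == some mx) with hres
  have hmemres : ∀ c, c ∈ res ↔ c ∈ cs ∧ (cs.count c : Int) = mx := by
    intro c
    simp [hres, List.mem_filter, PySem.Dict.getD_counter, PySem.Set.mem_ofList]
  have hresne : res ≠ [] := by
    obtain ⟨c, hc, he⟩ := hmx_mem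
    exact List.ne_nil_of_mem ((hmemres c).mpr ⟨hc, he⟩)
  obtain ⟨c, t, hsort⟩ : ∃ c t, PySem.List.sorted res (fun x => x) false = c :: t := by
    cases h : PySem.List.sorted res (fun x => x) false with
    | nil => exact absurd ((PySem.List.sorted_eq_nil_iff _ _ _).mp h) hresne
    | cons c t => exact ⟨c, t, rfl⟩
  have hcres : c ∈ res := by
    have : c ∈ PySem.List.sorted res (fun x => x) false := by rw [hsort]; exact List.mem_cons_self
    exact (PySem.List.mem_sorted _ _ _ _).mp this
  obtain ⟨hccs, hcmx⟩ := (hmemres c).mp hcres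
  refine ⟨c, ⟨hccs, ?_, ?_⟩, by rw [hsort]⟩
  · intro d hd
    have := hmx_ub d hd
    omega
  · intro d hd he
    have hdres : d ∈ res := (hmemres d).mpr ⟨hd, by omega⟩
    exact PySem.List.key_head_sorted_le _ _ hsort d hdres

-- ===== VERDICT (by name: the statement is the Claim_ definition above) =====
theorem getMaxOccurringChar_spec : Claim_equal_getMaxOccurringChar := by
  intro s _ hpre
  unfold Spec_getMaxOccurringChar getMaxOccurringChar_alt
  obtain ⟨c, hbest, hA⟩ := A_best s hpre
  have hB := goAlt_best s.toList.length s.toList le_rfl hpre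
  rw [if_neg hpre, hA, pvBest_unique hbest hB.1]
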